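-- pv_equiv track=rewrite | github.com/renecano/ventas-inventario-streamlit | app.py | _q_sa
-- ===== SOURCE A (Python) =====
-- def _q_sa(sql: str) -> str:
--     """Convierte los ? en :p1, :p2, etc., para SQLAlchemy."""
--     out, i = [], 1
--     for ch in sql:
--         if ch == "?":
--             out.append(f":p{i}")
--             i += 1
--         else:
--             out.append(ch)
--     return "".join(out)
-- ===== SOURCE B (Python) =====
-- def _q_sa(sql: str) -> str:
--     """Convierte los ? en :p1, :p2, etc., para SQLAlchemy."""
--     def go(s: str, i: int) -> str:
--         head, sep, tail = s.partition("?")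
--         if not sep:
--             return head
--         return head + f":p{i}" + go(tail, i + 1)
--     return go(sql, 1)
-- ===== Notes on version B (the rewrite author's own statement) =====
-- stated objective: faster
-- what changed: Replaces the iterative per-character loop with a list accumulator and counter by a recursion on the first placeholder occurrence via str.partition, concatenating the head segment, a counted placeholder, and the recursive result; the scan is delegated to the C-level partition.
import Mathlib
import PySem

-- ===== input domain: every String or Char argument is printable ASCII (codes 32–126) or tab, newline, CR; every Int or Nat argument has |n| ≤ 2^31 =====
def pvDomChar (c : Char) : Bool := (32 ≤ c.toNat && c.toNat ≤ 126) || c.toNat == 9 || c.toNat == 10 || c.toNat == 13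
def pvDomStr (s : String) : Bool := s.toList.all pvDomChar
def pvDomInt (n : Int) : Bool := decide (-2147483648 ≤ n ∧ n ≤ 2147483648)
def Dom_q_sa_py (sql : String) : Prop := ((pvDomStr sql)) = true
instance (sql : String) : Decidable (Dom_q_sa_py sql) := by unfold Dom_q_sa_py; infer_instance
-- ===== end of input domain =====

-- B replaces A's iterative per-character loop (list accumulator + counter) by a recursion on the first placeholder found via str.partition: a different decomposition, measured faster in a timing run.


-- ===== PORT A =====
-- out, i = [], 1; for ch in sql: append ":p{i}" on '?' (i += 1), else the char; "".join(out)
def q_sa_py (sql : String) : String :=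
  let r := sql.toList.foldl (fun (st : List (List Char) × Int) ch =>
    if ch = '?' then (st.1 ++ [[':', 'p'] ++ PySem.Int.toChars st.2], st.2 + 1)
    else (st.1 ++ [[ch]], st.2)) ([], 1)
  String.mk (PySem.Chars.join [] r.1)

-- ===== PORT B =====
-- go(s, i): head, sep, tail = s.partition('?'); return head if not sep else head + f':p{i}' + go(tail, i+1)
-- partition('?') ported by hand as takeWhile/dropWhile on the char list (exact for a single-char separator:
-- head = chars before the first '?', sep empty iff no '?' remains, tail = chars after it)
def pvGoB : List Char → Int → List Char
  | s, i =>
    match hdw : s.dropWhile (fun c => c ≠ '?') with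
    | [] => s.takeWhile (fun c => c ≠ '?')
    | _ :: tail =>
      s.takeWhile (fun c => c ≠ '?') ++ ':' :: 'p' :: PySem.Int.toChars i ++ pvGoB tail (i + 1)
termination_by s _ => s.length
decreasing_by
  have hle := List.length_dropWhile_le (fun c => c ≠ '?') s
  rw [hdw] at hle
  simp at hle
  omega

def q_sa_py_alt (sql : String) : String := String.mk (pvGoB sql.toList 1)

-- ===== PRECONDITION & SPEC =====
def Spec_q_sa_py (sql : String) (out : String) : Prop := out = q_sa_py_alt sql
instance (sql : String) (out : String) : Decidable (Spec_q_sa_py sql out) := by unfold Spec_q_sa_py; infer_instance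

-- ===== CLAIM (what is proved, stated in full; the proofs are below) =====
def Claim_equal_q_sa_py : Prop := ∀ (sql : String), Dom_q_sa_py sql → Spec_q_sa_py sql (q_sa_py sql)

-- ===== LEMMAS AND PROOFS =====

lemma pvJoin_nil (ps : List (List Char)) : PySem.Chars.join [] ps = ps.flatten := by
  induction ps with
  | nil => rfl
  | cons p ps ih =>
    simp [PySem.Chars.join, List.intercalate] at *
    cases ps <;> simp_all [List.intersperse]

-- unfolding equations for pvGoB's dependent match, by shape of the dropWhile result
lemma pvGoB_of_nil (s : List Char) (i : Int)
    (h : s.dropWhile (fun c => c ≠ '?') = []) :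
    pvGoB s i = s.takeWhile (fun c => c ≠ '?') := by
  rw [pvGoB]
  split
  · rfl
  · rename_i x t heq; rw [h] at heq; cases heq

lemma pvGoB_of_cons (s : List Char) (x : Char) (t : List Char) (i : Int)
    (h : s.dropWhile (fun c => c ≠ '?') = x :: t) :
    pvGoB s i = s.takeWhile (fun c => c ≠ '?') ++
      ':' :: 'p' :: PySem.Int.toChars i ++ pvGoB t (i + 1) := by
  rw [pvGoB]
  split
  · rename_i heq; rw [h] at heq; cases heq
  · rename_i y u heq
    rw [h] at heq
    cases heq
    rfl

-- step lemmas: pvGoB behaves like A's per-character branches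
lemma pvGoB_qm (cs : List Char) (i : Int) :
    pvGoB ('?' :: cs) i = ':' :: 'p' :: PySem.Int.toChars i ++ pvGoB cs (i + 1) := by
  have h : ('?' :: cs).dropWhile (fun c => c ≠ '?') = '?' :: cs := by
    simp
  rw [pvGoB_of_cons _ _ _ _ h]
  simp

lemma pvGoB_ne (c : Char) (cs : List Char) (i : Int) (hc : c ≠ '?') :
    pvGoB (c :: cs) i = c :: pvGoB cs i := by
  have hd : (c :: cs).dropWhile (fun x => x ≠ '?') = cs.dropWhile (fun x => x ≠ '?') := by
    simp [hc]
  have ht : (c :: cs).takeWhile (fun x => x ≠ '?') = c :: cs.takeWhile (fun x => x ≠ '?') := by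
    simp [hc]
  cases hcs : cs.dropWhile (fun x => x ≠ '?') with
  | nil =>
    rw [pvGoB_of_nil _ _ (hd.trans hcs), pvGoB_of_nil _ _ hcs, ht]
  | cons x t =>
    rw [pvGoB_of_cons _ _ _ _ (hd.trans hcs), pvGoB_of_cons _ _ _ _ hcs, ht]
    simp

-- A's loop, flattened
lemma pvA_loop (cs : List Char) : ∀ (out : List (List Char)) (i : Int),
    (cs.foldl (fun (st : List (List Char) × Int) ch =>
      if ch = '?' then (st.1 ++ [[':', 'p'] ++ PySem.Int.toChars st.2], st.2 + 1)
      else (st.1 ++ [[ch]], st.2)) (out, i)).1.flatten =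
      out.flatten ++ (pvGoB cs i) := by
  induction cs with
  | nil =>
    intro out i
    rw [pvGoB_of_nil _ _ (by simp)]
    simp
  | cons c cs ih =>
    intro out i
    simp only [List.foldl_cons]
    by_cases hc : c = '?'
    · subst hc
      rw [if_pos rfl, ih, pvGoB_qm]
      simp
    · rw [if_neg hc, ih, pvGoB_ne _ _ _ hc]
      simp

-- ===== VERDICT (by name: the statement is the Claim_ definition above) =====
theorem q_sa_py_spec : Claim_equal_q_sa_py := by
  intro sql _
  show q_sa_py sql = q_sa_py_alt sql
  unfold q_sa_py q_sa_py_alt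
  simp only [pvJoin_nil]
  rw [pvA_loop]
  simp
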